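-- pv_equiv track=rewrite | github.com/sds2317884/Algorithm | Programmers_2-4.py | solution
-- ===== SOURCE A (Python) =====
-- def solution(priorities, location):
--     #1. Queue를 만든다.
--     printer = [(i,p) for i,p in enumerate(priorities)]
--     turn = 0
--     while printer:
--         job = printer.pop(0)
--         #2. 나보다 중요한 job이 있으면 뒤에 넣는다.
--         if any(job[1] < other_job[1] for other_job in printer):
--             printer.append(job)
--         else:
--             turn+=1
--             #3. 내가 제일 중요하다면 수행하고 location과 비교한다.
--             if job[0] == location:
--                 break
--     return turn
-- ===== SOURCE B (Python) =====
-- # Level-sweep: repeatedly remove the whole highest-priority level in one O(n) pass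
-- # (cutting the queue at the last top-priority job), instead of simulating pop/append per element.
-- def solution(priorities, location):
--     q = list(enumerate(priorities))
--     turn = 0
--     while True:
--         if all(i != location for i, _ in q):
--             return turn + len(q)
--         top = max(p for _, p in q)
--         tp = next(p for i, p in q if i == location)
--         if tp == top:
--             cnt = 0
--             for i, p in q:
--                 if p == top:
--                     cnt += 1
--                 if i == location:
--                     return turn + cnt
--         # remove the whole top level; queue resumes after its last member
--         turn += sum(1 for _, p in q if p == top)
--         k = len(q) - 1
--         while q[k][1] != top:
--             k -= 1
--         q = q[k + 1:] + [e for e in q[:k] if e[1] < top]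
-- ===== Notes on version B (the rewrite author's own statement) =====
-- stated objective: faster
-- what changed: B replaces A's per-element pop/requeue simulation (each step rescans the queue for a higher priority and pops from the front of a list) by a level sweep that removes the entire highest-priority level in one pass, cutting the queue after its last top-priority job, until the requested job's priority is the maximum.
import Mathlib
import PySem

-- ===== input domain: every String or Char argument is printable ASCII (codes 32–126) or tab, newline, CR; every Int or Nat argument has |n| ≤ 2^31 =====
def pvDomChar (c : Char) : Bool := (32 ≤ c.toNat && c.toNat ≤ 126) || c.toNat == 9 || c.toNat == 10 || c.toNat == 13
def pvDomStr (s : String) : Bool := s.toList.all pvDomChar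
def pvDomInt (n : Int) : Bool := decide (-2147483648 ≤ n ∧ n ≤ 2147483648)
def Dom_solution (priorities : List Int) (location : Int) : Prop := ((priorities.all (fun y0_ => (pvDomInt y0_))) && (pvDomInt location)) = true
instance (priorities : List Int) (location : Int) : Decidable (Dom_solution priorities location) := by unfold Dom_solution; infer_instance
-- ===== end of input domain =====

-- B (solution_alt) replaces A's one-job-at-a-time pop/append simulation by a level sweep that
-- removes the whole highest-priority level of the queue in one pass; measured faster on the
-- timing inputs.

-- ===== PORT A =====
-- the maximal priority of a queue (Python max over the priorities; 0 is never used: only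
-- applied to nonempty queues) — used by loopA only in its termination measure
def topOf (q : List (Int × Int)) : Int := (PySem.List.max? (q.map Prod.snd) (fun y => y)).getD 0

theorem topOf_spec (q : List (Int × Int)) (h : q ≠ []) :
    topOf q ∈ q.map Prod.snd ∧ ∀ y ∈ q.map Prod.snd, y ≤ topOf q := by
  have hne : (q.map Prod.snd) ≠ [] := by cases q with | nil => exact absurd rfl h | cons a t => simp
  obtain ⟨m, hm⟩ : ∃ m, PySem.List.max? (q.map Prod.snd) (fun y => y) = some m := by
    cases hmx : PySem.List.max? (q.map Prod.snd) (fun y => y) with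
    | none => exact absurd ((PySem.List.max?_eq_none_iff _ _).mp hmx) hne
    | some m => exact ⟨m, rfl⟩
  have : topOf q = m := by simp only [topOf, hm, Option.getD_some]
  rw [this]
  exact ⟨PySem.List.max?_mem hm, PySem.List.max?_isMax hm⟩

theorem topOf_eq (q : List (Int × Int)) (m : Int) (hmem : m ∈ q.map Prod.snd)
    (hmax : ∀ y ∈ q.map Prod.snd, y ≤ m) : topOf q = m := by
  have hq : q ≠ [] := by
    intro hc; subst hc; exact absurd hmem (by simp)
  obtain ⟨h1, h2⟩ := topOf_spec q hq
  exact le_antisymm (hmax _ h1) (h2 _ hmem)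

-- termination helper for loopA: rotating a non-maximal front job moves the first maximal
-- job strictly closer to the front
theorem rot_top (job : Int × Int) (rest : List (Int × Int))
    (h : ∃ x ∈ rest, job.2 < x.2) :
    job.2 < topOf (job :: rest) ∧ topOf (job :: rest) ∈ rest.map Prod.snd ∧
      topOf (rest ++ [job]) = topOf (job :: rest) := by
  obtain ⟨x, hx, hlt⟩ := h
  obtain ⟨hmem, hmax⟩ := topOf_spec (job :: rest) (by simp)
  have hjm : job.2 < topOf (job :: rest) :=
    lt_of_lt_of_le hlt (hmax _ (List.mem_map_of_mem (List.mem_cons_of_mem job hx)))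
  have hmrest : topOf (job :: rest) ∈ rest.map Prod.snd := by
    rcases List.mem_map.mp hmem with ⟨e, he, he2⟩
    rcases List.mem_cons.mp he with h' | h'
    · subst h'; exact absurd he2 (ne_of_lt hjm)
    · exact he2 ▸ List.mem_map_of_mem h'
  refine ⟨hjm, hmrest, ?_⟩
  apply topOf_eq
  · rcases List.mem_map.mp hmrest with ⟨e, he, he2⟩
    exact he2 ▸ List.mem_map_of_mem (List.mem_append_left _ he)
  · intro y hy
    apply hmax
    rcases List.mem_map.mp hy with ⟨e, he, he2⟩
    rcases List.mem_append.mp he with h' | h'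
    · exact he2 ▸ List.mem_map_of_mem (List.mem_cons_of_mem job h')
    · simp at h'; subst h'; exact he2 ▸ List.mem_map_of_mem List.mem_cons_self

theorem rot_findIdx (job : Int × Int) (rest : List (Int × Int))
    (h : ∃ x ∈ rest, job.2 < x.2) :
    (rest ++ [job]).findIdx (fun e => e.2 == topOf (rest ++ [job])) <
      (job :: rest).findIdx (fun e => e.2 == topOf (job :: rest)) := by
  obtain ⟨hjm, hmrest, htop2⟩ := rot_top job rest h
  have hhit : ∃ e ∈ rest, (fun e : Int × Int => e.2 == topOf (rest ++ [job])) e = true := by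
    obtain ⟨e, he, he2⟩ := List.mem_map.mp hmrest
    exact ⟨e, he, by simp [htop2, he2]⟩
  have hidx : rest.findIdx (fun e => e.2 == topOf (rest ++ [job])) < rest.length :=
    List.findIdx_lt_length.mpr hhit
  have hL : (rest ++ [job]).findIdx (fun e => e.2 == topOf (rest ++ [job]))
      = rest.findIdx (fun e => e.2 == topOf (rest ++ [job])) := by
    rw [List.findIdx_append, if_pos hidx]
  have hR : (job :: rest).findIdx (fun e => e.2 == topOf (job :: rest))
      = rest.findIdx (fun e => e.2 == topOf (job :: rest)) + 1 := by
    rw [List.findIdx_cons]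
    have : (job.2 == topOf (job :: rest)) = false := by simp; omega
    simp [this]
  rw [hL, hR, htop2]
  omega

-- the while loop of A: pop the front job; if a strictly more important job remains, requeue
-- it at the back, else print it (turn += 1) and stop when it is the requested job
def loopA (q : List (Int × Int)) (location : Int) (turn : Int) : Int :=
  match q with
  | [] => turn
  | job :: rest =>
    if h : ∃ x ∈ rest, job.2 < x.2 then
      loopA (rest ++ [job]) location turn
    else
      if job.1 = location then turn + 1
      else loopA rest location (turn + 1)
termination_by (q.length, q.findIdx (fun e => e.2 == topOf q))
decreasing_by
  · apply Prod.Lex.right' <;> simp [rot_findIdx job rest h]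
  · apply Prod.Lex.left; simp

def solution (priorities : List Int) (location : Int) : Int :=
  loopA (PySem.List.enumerate priorities) location 0

-- ===== PORT B =====
-- priority of the (first) job whose index is `location` (Python's next(...); 0 never used:
-- only called when such a job exists)
def findPri : List (Int × Int) → Int → Int
  | [], _ => 0
  | e :: t, location => if e.1 = location then e.2 else findPri t location

-- the scan `cnt += (p == top); if i == location: return cnt`
def eqCount : List (Int × Int) → Int → Int → Int
  | [], _, _ => 0
  | e :: t, location, top =>
    let c : Int := if e.2 = top then 1 else 0
    if e.1 = location then c else c + eqCount t location top

-- number of jobs of the top priority level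
def countTop (q : List (Int × Int)) (top : Int) : Int :=
  ((q.filter (fun e => e.2 == top)).length : Int)

-- cut the queue after its LAST top-priority job (the scan `k -= 1` from the right), drop the
-- whole top level, keep the rotated remainder: q[k+1:] + [e for e in q[:k] if e[1] < top]
def restOf (q : List (Int × Int)) (top : Int) : List (Int × Int) :=
  let rev := q.reverse
  let suf := rev.takeWhile (fun e => e.2 != top)
  let pre := rev.dropWhile (fun e => e.2 != top)
  suf.reverse ++ (pre.tail.reverse.filter (fun e => e.2 < top))

theorem restOf_length_lt (q : List (Int × Int)) (top : Int)
    (h : top ∈ q.map Prod.snd) : (restOf q top).length < q.length := by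
  obtain ⟨e, he, he2⟩ := List.mem_map.mp h
  have hrev : e ∈ q.reverse := List.mem_reverse.mpr he
  have hpre : q.reverse.dropWhile (fun e => e.2 != top) ≠ [] := by
    intro hc
    have := (List.dropWhile_eq_nil_iff.mp hc) e hrev
    simp [he2] at this
  have hsplit : (q.reverse.takeWhile (fun e => e.2 != top)).length
      + (q.reverse.dropWhile (fun e => e.2 != top)).length = q.length := by
    rw [← List.length_append, List.takeWhile_append_dropWhile, List.length_reverse]
  have hfil : ((q.reverse.dropWhile (fun e => e.2 != top)).tail.reverse.filter
      (fun e => e.2 < top)).length ≤ (q.reverse.dropWhile (fun e => e.2 != top)).tail.length := by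
    calc _ ≤ (q.reverse.dropWhile (fun e => e.2 != top)).tail.reverse.length :=
          List.length_filter_le _ _
      _ = _ := by simp
  have htail : (q.reverse.dropWhile (fun e => e.2 != top)).tail.length
      = (q.reverse.dropWhile (fun e => e.2 != top)).length - 1 := by simp
  have hpos : 0 < (q.reverse.dropWhile (fun e => e.2 != top)).length :=
    List.length_pos_of_ne_nil hpre
  simp only [restOf, List.length_append, List.length_reverse]
  omega

-- the while loop of B: if the requested job is absent every remaining job prints; if it has
-- the top priority, count top jobs up to it; otherwise print the whole top level and recurse
def loopB (q : List (Int × Int)) (location : Int) (turn : Int) : Int :=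
  if h : ∀ e ∈ q, e.1 ≠ location then turn + (q.length : Int)
  else
    if findPri q location = topOf q then turn + eqCount q location (topOf q)
    else loopB (restOf q (topOf q)) location (turn + countTop q (topOf q))
termination_by q.length
decreasing_by
  apply restOf_length_lt
  push_neg at h
  obtain ⟨e, he, _⟩ := h
  exact (topOf_spec q (List.ne_nil_of_mem he)).1

def solution_alt (priorities : List Int) (location : Int) : Int :=
  loopB (PySem.List.enumerate priorities) location 0

-- ===== PRECONDITION & SPEC =====
def Spec_solution (priorities : List Int) (location : Int) (out : Int) : Prop := out = solution_alt priorities location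
instance (priorities : List Int) (location : Int) (out : Int) : Decidable (Spec_solution priorities location out) := by unfold Spec_solution; infer_instance

-- ===== CLAIM (what is proved, stated in full; the proofs are below) =====
def Claim_equal_solution : Prop := ∀ (priorities : List Int) (location : Int), Dom_solution priorities location → Spec_solution priorities location (solution priorities location)

-- ===== LEMMAS AND PROOFS =====

-- takeWhile/dropWhile over an append, split on whether the first part is all-true
theorem tw_app_all {α : Type} (p : α → Bool) (l₁ l₂ : List α) (h : ∀ a ∈ l₁, p a = true) :
    (l₁ ++ l₂).takeWhile p = l₁ ++ l₂.takeWhile p := by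
  induction l₁ with
  | nil => simp
  | cons a t ih =>
    rw [List.cons_append, List.takeWhile_cons_of_pos (h a List.mem_cons_self),
      ih (fun a ha => h a (List.mem_cons_of_mem _ ha)), List.cons_append]

theorem dw_app_all {α : Type} (p : α → Bool) (l₁ l₂ : List α) (h : ∀ a ∈ l₁, p a = true) :
    (l₁ ++ l₂).dropWhile p = l₂.dropWhile p := by
  induction l₁ with
  | nil => simp
  | cons a t ih =>
    rw [List.cons_append, List.dropWhile_cons_of_pos (h a List.mem_cons_self)]
    exact ih (fun a ha => h a (List.mem_cons_of_mem _ ha))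

theorem tw_app_ex {α : Type} (p : α → Bool) (l₁ l₂ : List α) (h : ∃ a ∈ l₁, p a = false) :
    (l₁ ++ l₂).takeWhile p = l₁.takeWhile p := by
  induction l₁ with
  | nil => obtain ⟨a, ha, _⟩ := h; exact absurd ha (by simp)
  | cons a t ih =>
    cases hpa : p a with
    | false =>
      rw [List.cons_append, List.takeWhile_cons_of_neg (by simp [hpa]),
        List.takeWhile_cons_of_neg (by simp [hpa])]
    | true =>
      rw [List.cons_append, List.takeWhile_cons_of_pos hpa, List.takeWhile_cons_of_pos hpa]
      obtain ⟨b, hb, hpb⟩ := h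
      rcases List.mem_cons.mp hb with h' | h'
      · subst h'; rw [hpa] at hpb; exact absurd hpb (by simp)
      · rw [ih ⟨b, h', hpb⟩]

theorem dw_app_ex {α : Type} (p : α → Bool) (l₁ l₂ : List α) (h : ∃ a ∈ l₁, p a = false) :
    (l₁ ++ l₂).dropWhile p = l₁.dropWhile p ++ l₂ := by
  induction l₁ with
  | nil => obtain ⟨a, ha, _⟩ := h; exact absurd ha (by simp)
  | cons a t ih =>
    cases hpa : p a with
    | false =>
      rw [List.cons_append, List.dropWhile_cons_of_neg (by simp [hpa]),
        List.dropWhile_cons_of_neg (by simp [hpa]), List.cons_append]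
    | true =>
      rw [List.cons_append, List.dropWhile_cons_of_pos hpa, List.dropWhile_cons_of_pos hpa]
      exact ih (by
        obtain ⟨b, hb, hpb⟩ := h
        rcases List.mem_cons.mp hb with h' | h'
        · subst h'; rw [hpa] at hpb; exact absurd hpb (by simp)
        · exact ⟨b, h', hpb⟩)

theorem dw_ne_nil {α : Type} (p : α → Bool) (l : List α) (h : ∃ a ∈ l, p a = false) :
    l.dropWhile p ≠ [] := by
  intro hc
  obtain ⟨a, ha, hpa⟩ := h
  rw [List.dropWhile_eq_nil_iff.mp hc a ha] at hpa
  exact absurd hpa (by simp)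

theorem ex_rev_bne (rest : List (Int × Int)) (top : Int) (hmem : top ∈ rest.map Prod.snd) :
    ∃ a ∈ rest.reverse, (a.2 != top) = false := by
  obtain ⟨e, he, he2⟩ := List.mem_map.mp hmem
  exact ⟨e, List.mem_reverse.mpr he, by simp [he2]⟩

-- restOf: prepending a job of the top priority when the top also occurs later
theorem restOf_cons_top (job : Int × Int) (rest : List (Int × Int)) (top : Int)
    (hjob : job.2 = top) (hmem : top ∈ rest.map Prod.snd) :
    restOf (job :: rest) top = restOf rest top := by
  have hex := ex_rev_bne rest top hmem
  have hpre : rest.reverse.dropWhile (fun e => e.2 != top) ≠ [] := dw_ne_nil _ _ hex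
  simp only [restOf, List.reverse_cons]
  rw [tw_app_ex _ _ _ hex, dw_app_ex _ _ _ hex,
    List.tail_append_of_ne_nil hpre]
  simp [hjob]

-- restOf: prepending the unique top-priority job just drops it
theorem restOf_cons_unique (job : Int × Int) (rest : List (Int × Int)) (top : Int)
    (hjob : job.2 = top) (hnm : top ∉ rest.map Prod.snd) :
    restOf (job :: rest) top = rest := by
  have hall : ∀ a ∈ rest.reverse, (a.2 != top) = true := by
    intro a ha
    have : a.2 ≠ top := fun hc => hnm (hc ▸ List.mem_map_of_mem (List.mem_reverse.mp ha))
    simp [this]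
  simp only [restOf, List.reverse_cons]
  rw [tw_app_all _ _ _ hall, dw_app_all _ _ _ hall]
  simp [hjob]

-- restOf is invariant under rotating a below-top front job to the back
theorem restOf_rotate (job : Int × Int) (rest : List (Int × Int)) (top : Int)
    (hlt : job.2 < top) (hmem : top ∈ rest.map Prod.snd) :
    restOf (rest ++ [job]) top = restOf (job :: rest) top := by
  have hex := ex_rev_bne rest top hmem
  have hpre : rest.reverse.dropWhile (fun e => e.2 != top) ≠ [] := dw_ne_nil _ _ hex
  have hjb : (fun e : Int × Int => e.2 != top) job = true := by simp; omega
  simp only [restOf, List.reverse_append, List.reverse_cons, List.reverse_nil, List.nil_append,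
    List.singleton_append]
  rw [List.takeWhile_cons_of_pos (p := fun e : Int × Int => e.2 != top) (l := rest.reverse) hjb,
    List.dropWhile_cons_of_pos (p := fun e : Int × Int => e.2 != top) (l := rest.reverse) hjb,
    tw_app_ex _ _ _ hex, dw_app_ex _ _ _ hex, List.tail_append_of_ne_nil hpre]
  simp [hlt]

-- findPri over append / cons
theorem findPri_append_right (l₁ l₂ : List (Int × Int)) (loc : Int)
    (h : ∀ e ∈ l₁, e.1 ≠ loc) : findPri (l₁ ++ l₂) loc = findPri l₂ loc := by
  induction l₁ with
  | nil => simp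
  | cons a t ih =>
    simp only [List.cons_append, findPri, if_neg (h a (List.mem_cons_self))]
    exact ih (fun e he => h e (List.mem_cons_of_mem _ he))

theorem findPri_append_left (l₁ l₂ : List (Int × Int)) (loc : Int)
    (h : ∃ e ∈ l₁, e.1 = loc) : findPri (l₁ ++ l₂) loc = findPri l₁ loc := by
  induction l₁ with
  | nil => obtain ⟨e, he, _⟩ := h; exact absurd he (by simp)
  | cons a t ih =>
    by_cases ha : a.1 = loc
    · simp [findPri, ha]
    · simp only [List.cons_append, findPri, if_neg ha]
      apply ih
      obtain ⟨e, he, he2⟩ := h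
      rcases List.mem_cons.mp he with h' | h'
      · subst h'; exact absurd he2 ha
      · exact ⟨e, h', he2⟩

theorem findPri_mem (l : List (Int × Int)) (loc : Int) (h : ∃ e ∈ l, e.1 = loc) :
    findPri l loc ∈ l.map Prod.snd := by
  induction l with
  | nil => obtain ⟨e, he, _⟩ := h; exact absurd he (by simp)
  | cons a t ih =>
    by_cases ha : a.1 = loc
    · simp [findPri, ha]
    · simp only [findPri, if_neg ha, List.map_cons]
      apply List.mem_cons_of_mem
      apply ih
      obtain ⟨e, he, he2⟩ := h
      rcases List.mem_cons.mp he with h' | h'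
      · subst h'; exact absurd he2 ha
      · exact ⟨e, h', he2⟩

-- eqCount stops at the requested job, so a suffix after it is irrelevant
theorem eqCount_append_left (l₁ l₂ : List (Int × Int)) (loc top : Int)
    (h : ∃ e ∈ l₁, e.1 = loc) : eqCount (l₁ ++ l₂) loc top = eqCount l₁ loc top := by
  induction l₁ with
  | nil => obtain ⟨e, he, _⟩ := h; exact absurd he (by simp)
  | cons a t ih =>
    by_cases ha : a.1 = loc
    · simp [eqCount, ha]
    · simp only [List.cons_append, eqCount, if_neg ha]
      congr 1
      apply ih
      obtain ⟨e, he, he2⟩ := h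
      rcases List.mem_cons.mp he with h' | h'
      · subst h'; exact absurd he2 ha
      · exact ⟨e, h', he2⟩

theorem countTop_cons (a : Int × Int) (t : List (Int × Int)) (top : Int) :
    countTop (a :: t) top = (if a.2 = top then 1 else 0) + countTop t top := by
  by_cases ha : a.2 = top <;> simp [countTop, List.filter_cons, ha] <;> push_cast <;> ring

theorem countTop_append (l₁ l₂ : List (Int × Int)) (top : Int) :
    countTop (l₁ ++ l₂) top = countTop l₁ top + countTop l₂ top := by
  simp [countTop, List.filter_append]

theorem countTop_eq_zero (l : List (Int × Int)) (top : Int) (h : top ∉ l.map Prod.snd) :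
    countTop l top = 0 := by
  have : l.filter (fun e => e.2 == top) = [] := by
    apply List.filter_eq_nil_iff.mpr
    intro e he
    simp
    intro hc
    exact h (hc ▸ List.mem_map_of_mem he)
  simp [countTop, this]

-- one-step unfolding equations for the two loops
theorem loopA_nil (loc turn : Int) : loopA [] loc turn = turn := by
  rw [loopA]

theorem loopA_rot (job : Int × Int) (rest : List (Int × Int)) (loc turn : Int)
    (h : ∃ x ∈ rest, job.2 < x.2) :
    loopA (job :: rest) loc turn = loopA (rest ++ [job]) loc turn := by
  conv_lhs => rw [loopA]
  rw [dif_pos h]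

theorem loopA_hit (job : Int × Int) (rest : List (Int × Int)) (loc turn : Int)
    (h : ¬ ∃ x ∈ rest, job.2 < x.2) (hj : job.1 = loc) :
    loopA (job :: rest) loc turn = turn + 1 := by
  conv_lhs => rw [loopA]
  rw [dif_neg h, if_pos hj]

theorem loopA_next (job : Int × Int) (rest : List (Int × Int)) (loc turn : Int)
    (h : ¬ ∃ x ∈ rest, job.2 < x.2) (hj : job.1 ≠ loc) :
    loopA (job :: rest) loc turn = loopA rest loc (turn + 1) := by
  conv_lhs => rw [loopA]
  rw [dif_neg h, if_neg hj]

theorem loopB_nohit (q : List (Int × Int)) (loc turn : Int) (h : ∀ e ∈ q, e.1 ≠ loc) :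
    loopB q loc turn = turn + (q.length : Int) := by
  conv_lhs => rw [loopB]
  rw [dif_pos h]

theorem loopB_hit_eq (q : List (Int × Int)) (loc turn : Int) (h : ¬ ∀ e ∈ q, e.1 ≠ loc)
    (h2 : findPri q loc = topOf q) :
    loopB q loc turn = turn + eqCount q loc (topOf q) := by
  conv_lhs => rw [loopB]
  rw [dif_neg h, if_pos h2]

theorem loopB_step (q : List (Int × Int)) (loc turn : Int) (h : ¬ ∀ e ∈ q, e.1 ≠ loc)
    (h2 : findPri q loc ≠ topOf q) :
    loopB q loc turn = loopB (restOf q (topOf q)) loc (turn + countTop q (topOf q)) := by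
  conv_lhs => rw [loopB]
  rw [dif_neg h, if_neg h2]

-- rotating a job with a strictly more important job behind it does not change loopB
theorem loopB_rotate (job : Int × Int) (rest : List (Int × Int)) (loc turn : Int)
    (h : ∃ x ∈ rest, job.2 < x.2) (hnd : ((job :: rest).map Prod.fst).Nodup) :
    loopB (rest ++ [job]) loc turn = loopB (job :: rest) loc turn := by
  obtain ⟨hjm, hmrest, htop2⟩ := rot_top job rest h
  by_cases hall : ∀ e ∈ job :: rest, e.1 ≠ loc
  · have hall2 : ∀ e ∈ rest ++ [job], e.1 ≠ loc := by
      intro e he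
      rcases List.mem_append.mp he with h' | h'
      · exact hall e (List.mem_cons_of_mem _ h')
      · simp at h'; subst h'; exact hall _ List.mem_cons_self
    rw [loopB_nohit _ _ _ hall2, loopB_nohit _ _ _ hall]
    simp
  · have hall2 : ¬ ∀ e ∈ rest ++ [job], e.1 ≠ loc := by
      intro hc
      apply hall
      intro e he
      rcases List.mem_cons.mp he with h' | h'
      · subst h'; exact hc e (List.mem_append_right _ (by simp))
      · exact hc e (List.mem_append_left _ h')
    have hjn : job.1 ∉ rest.map Prod.fst := by
      have := hnd
      simp only [List.map_cons, List.nodup_cons] at this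
      exact this.1
    have hfp : findPri (rest ++ [job]) loc = findPri (job :: rest) loc := by
      by_cases hj : job.1 = loc
      · have hrl : ∀ e ∈ rest, e.1 ≠ loc := by
          intro e he hc
          exact hjn (hj ▸ hc ▸ List.mem_map_of_mem he)
        rw [findPri_append_right _ _ _ hrl]
        simp [findPri, hj]
      · have hex : ∃ e ∈ rest, e.1 = loc := by
          push_neg at hall
          obtain ⟨e, he, he2⟩ := hall
          rcases List.mem_cons.mp he with h' | h'
          · subst h'; exact absurd he2 hj
          · exact ⟨e, h', he2⟩
        rw [findPri_append_left _ _ _ hex]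
        simp [findPri, hj]
    by_cases htp : findPri (job :: rest) loc = topOf (job :: rest)
    · rw [loopB_hit_eq _ _ _ hall2 (by rw [hfp, htop2]; exact htp),
        loopB_hit_eq _ _ _ hall htp, htop2]
      have hj : job.1 ≠ loc := by
        intro hc
        rw [show findPri (job :: rest) loc = job.2 from by simp [findPri, hc]] at htp
        omega
      have hex : ∃ e ∈ rest, e.1 = loc := by
        push_neg at hall
        obtain ⟨e, he, he2⟩ := hall
        rcases List.mem_cons.mp he with h' | h'
        · subst h'; exact absurd he2 hj
        · exact ⟨e, h', he2⟩
      rw [eqCount_append_left _ _ _ _ hex]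
      simp [eqCount, if_neg hj]
      omega
    · rw [loopB_step _ _ _ hall2 (by rw [hfp, htop2]; exact htp),
        loopB_step _ _ _ hall htp, htop2,
        restOf_rotate job rest _ hjm hmrest, countTop_append, countTop_cons, countTop_cons]
      have : ¬ job.2 = topOf (job :: rest) := by omega
      simp [countTop, this]

theorem loopAB (q : List (Int × Int)) (location turn : Int) :
    (q.map Prod.fst).Nodup → loopA q location turn = loopB q location turn := by
  induction q, turn using loopA.induct location with
  | case1 turn =>
    intro _
    rw [loopA_nil, loopB_nohit _ _ _ (by simp)]
    simp
  | case2 turn job rest h ih =>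
    intro hnd
    have hnd2 : ((rest ++ [job]).map Prod.fst).Nodup :=
      (((List.perm_append_singleton job rest).map Prod.fst).nodup_iff).mpr hnd
    rw [loopA_rot _ _ _ _ h, ih hnd2, loopB_rotate job rest location turn h hnd]
  | case3 turn job rest h hj =>
    intro hnd
    have hnall : ¬ ∀ e ∈ job :: rest, e.1 ≠ location :=
      fun hc => hc job List.mem_cons_self hj
    have htop : topOf (job :: rest) = job.2 := by
      apply topOf_eq
      · simp
      · intro y hy
        rcases List.mem_map.mp hy with ⟨e, he, he2⟩
        rcases List.mem_cons.mp he with h' | h'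
        · subst h'; omega
        · push_neg at h
          exact he2 ▸ (h e h')
    rw [loopA_hit _ _ _ _ h hj,
      loopB_hit_eq _ _ _ hnall (by rw [htop]; simp [findPri, hj]), htop]
    simp [eqCount, hj]
  | case4 turn job rest h hj ih =>
    intro hnd
    have hndr : (rest.map Prod.fst).Nodup := by
      simp only [List.map_cons, List.nodup_cons] at hnd
      exact hnd.2
    rw [loopA_next _ _ _ _ h hj, ih hndr]
    have htop : topOf (job :: rest) = job.2 := by
      apply topOf_eq
      · simp
      · intro y hy
        rcases List.mem_map.mp hy with ⟨e, he, he2⟩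
        rcases List.mem_cons.mp he with h' | h'
        · subst h'; omega
        · push_neg at h
          exact he2 ▸ (h e h')
    have hbound : ∀ y ∈ rest.map Prod.snd, y ≤ job.2 := by
      intro y hy
      rcases List.mem_map.mp hy with ⟨e, he, he2⟩
      push_neg at h
      exact he2 ▸ (h e he)
    by_cases hall : ∀ e ∈ rest, e.1 ≠ location
    · have hall2 : ∀ e ∈ job :: rest, e.1 ≠ location := by
        intro e he
        rcases List.mem_cons.mp he with h' | h'
        · subst h'; exact hj
        · exact hall e h'
      rw [loopB_nohit _ _ _ hall, loopB_nohit _ _ _ hall2]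
      simp
      ring
    · have hnall : ¬ ∀ e ∈ job :: rest, e.1 ≠ location :=
        fun hc => hall (fun e he => hc e (List.mem_cons_of_mem _ he))
      have hex : ∃ e ∈ rest, e.1 = location := by
        push_neg at hall
        exact hall
      have hfp : findPri (job :: rest) location = findPri rest location := by
        simp [findPri, hj]
      by_cases htp : findPri rest location = job.2
      · -- the requested job has the top priority
        have htopr : topOf rest = job.2 := by
          apply topOf_eq
          · exact htp ▸ findPri_mem rest location hex
          · exact hbound
        rw [loopB_hit_eq _ _ _ hall (by rw [htopr]; exact htp),
          loopB_hit_eq _ _ _ hnall (by rw [htop, hfp]; exact htp), htop, htopr]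
        simp [eqCount, if_neg hj]
        omega
      · by_cases hmem : job.2 ∈ rest.map Prod.snd
        · -- more jobs of the same top priority remain
          have htopr : topOf rest = job.2 := topOf_eq _ _ hmem hbound
          rw [loopB_step _ _ _ hall (by rw [htopr]; exact htp),
            loopB_step _ _ _ hnall (by rw [htop, hfp]; exact htp), htop, htopr,
            restOf_cons_top job rest job.2 rfl hmem]
          congr 1
          rw [countTop_cons]
          simp
          ring
        · -- job is the unique top-priority job: removing the level pops exactly job
          rw [loopB_step _ _ _ hnall (by rw [htop, hfp]; exact htp), htop,
            restOf_cons_unique job rest job.2 rfl hmem, countTop_cons,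
            countTop_eq_zero rest job.2 hmem]
          simp

-- ===== VERDICT (by name: the statement is the Claim_ definition above) =====
theorem solution_spec : Claim_equal_solution := by
  intro priorities location _
  unfold Spec_solution solution solution_alt
  apply loopAB
  have := PySem.List.pairwise_lt_enumerate priorities 0
  exact List.Pairwise.map Prod.fst (fun a b hab => hab) (this.imp (fun h => ne_of_lt h))
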